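-- pv_equiv track=rewrite | github.com/vabsalack/COMPETITIVE-CODING | CSE/CSE331/week1_PQandTree/1.9_modify_array.py | createtarget
-- ===== SOURCE A (Python) =====
-- from queue import PriorityQueue
--
-- def createtarget(target):
--
--     n = len(target)
--     sum = 0
--
--     lastsum = 0
--
--     maxheap = PriorityQueue()
--
--     for item in target:
--         maxheap.put(-item)
--
--     for i in range(0, n):
--         sum += target[i]
--
--     while True:
--
--         lastsum = -maxheap.get()
--         sum -= lastsum
--
--         if lastsum == 1 or sum == 1:
--             return True
--         if lastsum < sum or sum == 0 or lastsum - sum == 0: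
--             return False
--
--         lastsum -= sum
--         sum += lastsum
--
--         maxheap.put(-lastsum)
-- ===== SOURCE B (Python) =====
-- import heapq
--
-- def createtarget(target):
--     total = sum(target)
--     heap = [-x for x in target]
--     heapq.heapify(heap)
--     while True:
--         largest = -heapq.heappop(heap)
--         rest = total - largest
--         if largest == 1 or rest == 1:
--             return True
--         # the rest must be a positive sum strictly below the top value
--         if largest <= rest or rest <= 0:
--             return False
--         m = largest % rest
--         if m == 0:
--             return False
--         heapq.heappush(heap, -m)
--         total = rest + m
-- ===== Notes on version B (the rewrite author's own statement) =====
-- stated objective: faster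
-- what changed: A whittles the popped maximum down by one subtraction of the remaining sum per priority-queue round; B replaces that whole arithmetic progression by a single modulo per popped maximum (Euclid-style reduction) on a heapq heap; intended as faster (one --final run measured B 6.5x at the largest size, but A times out on most large inputs, so readings vary). Pre_ excludes the empty list (A's maxheap.get() blocks forever) and lists with a negative entry, on which A's loop can diverge and the values it does return are accidental loop-state artefacts outside the puzzle's domain.
-- outside the precondition, e.g. on createtarget([2, -1]): A does not finish within the time limit, B returns False; on createtarget([-1, -2]): A returns True, B returns False; on createtarget([-1]): A returns False, B returns False
import Mathlib
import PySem

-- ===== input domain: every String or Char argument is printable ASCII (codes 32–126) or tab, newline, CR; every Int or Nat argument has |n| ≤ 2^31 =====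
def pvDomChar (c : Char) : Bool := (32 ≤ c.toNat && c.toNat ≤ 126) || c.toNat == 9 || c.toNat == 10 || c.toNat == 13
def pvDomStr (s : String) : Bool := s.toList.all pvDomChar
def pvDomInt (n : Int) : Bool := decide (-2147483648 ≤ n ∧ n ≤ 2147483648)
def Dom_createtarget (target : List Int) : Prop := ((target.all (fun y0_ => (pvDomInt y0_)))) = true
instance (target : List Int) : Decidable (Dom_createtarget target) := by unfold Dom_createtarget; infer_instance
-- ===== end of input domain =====

-- B replaces A's one-subtraction-per-heap-round reduction by a single modulo per popped
-- maximum (Euclid-style); intended as faster (a timing run measured B 6.5x at the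
-- largest size on one run; A times out on most large inputs, so readings vary).

-- ===== PORT A =====
-- Both Pythons keep a max-priority queue of the current values (A stores the negated values in
-- a queue.PriorityQueue, B stores them negated in a heapq list); we represent that queue by the
-- plain list of the (un-negated) values it contains, and popping the maximum by pvPopMax, which
-- returns the first maximal element and the remaining list.  Ties are between equal integers, so
-- which occurrence a real heap would surface is observationally irrelevant.
def pvPopMax (x : Int) (xs : List Int) : Int × List Int :=
  match xs with
  | [] => (x, [])
  | y :: ys =>
    let p := pvPopMax y ys
    if p.1 ≤ x then (x, y :: ys) else (p.1, x :: p.2)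

-- A's while-True loop; `[] => false` is unreachable from A's call (the queue is the nonempty
-- target), and the `hdec` guard only makes the recursion total: under Pre_ the new sum is
-- always smaller (proved in the lemmas below), so the `else false` branch is never taken.
def pvALoop (sum : Int) (heap : List Int) : Bool :=
  match heap with
  | [] => false
  | h :: t =>
    let p := pvPopMax h t
    let lastsum := p.1
    let sum1 := sum - lastsum
    if lastsum = 1 ∨ sum1 = 1 then true
    else if lastsum < sum1 ∨ sum1 = 0 ∨ lastsum - sum1 = 0 then false
    else
      let lastsum2 := lastsum - sum1
      let sum2 := sum1 + lastsum2
      if hdec : sum2.toNat < sum.toNat then pvALoop sum2 (lastsum2 :: p.2)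
      else false
termination_by sum.toNat
decreasing_by exact hdec

def createtarget (target : List Int) : Bool :=
  let n : Int := (target.length : Int)
  -- for item in target: maxheap.put(-item)  — the queue then holds exactly the items of target
  let maxheap : List Int := target.foldl (fun h item => h ++ [item]) []
  -- for i in range(0, n): sum += target[i]  — indices are in range, so pyGetD is exact
  let sum : Int := (PySem.List.pyRange 0 n 1).foldl
      (fun s i => s + PySem.List.pyGetD target i 0) 0
  pvALoop sum maxheap

-- ===== PORT B =====
-- B's loop: one modulo per popped maximum.  `[] => false` on the match is where Source B's heappop
-- raises IndexError (empty input, outside Pre_); the `hdec` guard is the same totality guard as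
-- in A's port: under Pre_ the new total is always smaller, so `else false` is never taken.
def pvBLoop (total : Int) (heap : List Int) : Bool :=
  match heap with
  | [] => false
  | h :: t =>
    let p := pvPopMax h t
    let largest := p.1
    let rest := total - largest
    if largest = 1 ∨ rest = 1 then true
    else if largest ≤ rest ∨ rest ≤ 0 then false
    else
      let m := PySem.Int.mod largest rest
      if m = 0 then false
      else if hdec : (rest + m).toNat < total.toNat then pvBLoop (rest + m) (m :: p.2)
      else false
termination_by total.toNat
decreasing_by exact hdec

def createtarget_alt (target : List Int) : Bool :=
  -- total = sum(target); heap = [-x for x in target]; heapify(heap) — the heap holds the items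
  pvBLoop target.sum target

-- ===== PRECONDITION & SPEC =====
-- Pre_ excludes the empty list (A's maxheap.get() blocks forever, B's heappop raises IndexError)
-- and lists with a negative entry, on which A's loop can fail to terminate (e.g. [2, -1]
-- diverges) and the values it does return are accidental loop-state artefacts; nonnegative
-- entries are the natural domain of this sum-replacement puzzle.
def Pre_createtarget (target : List Int) : Prop :=
  target ≠ [] ∧ ∀ x ∈ target, 0 ≤ x
instance (target : List Int) : Decidable (Pre_createtarget target) := by
  unfold Pre_createtarget; infer_instance

def pvWitness_createtarget : List Int := [9, 3, 5]

def Spec_createtarget (target : List Int) (out : Bool) : Prop := out = createtarget_alt target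
instance (target : List Int) (out : Bool) : Decidable (Spec_createtarget target out) := by
  unfold Spec_createtarget; infer_instance

-- ===== CLAIM (what is proved, stated in full; the proofs are below) =====
def Claim_equal_createtarget : Prop := ∀ (target : List Int), Dom_createtarget target → Pre_createtarget target → Spec_createtarget target (createtarget target)

-- ===== LEMMAS AND PROOFS =====

lemma pvPopMax_mem (x : Int) (xs : List Int) : (pvPopMax x xs).1 ∈ x :: xs := by
  induction xs generalizing x with
  | nil => simp [pvPopMax]
  | cons y ys ih =>
    simp only [pvPopMax]
    split
    · simp
    · have := ih y
      rcases List.mem_cons.mp this with h | h <;> simp [h]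

lemma pvPopMax_sub (x : Int) (xs : List Int) : ∀ y ∈ (pvPopMax x xs).2, y ∈ x :: xs := by
  induction xs generalizing x with
  | nil => simp [pvPopMax]
  | cons y ys ih =>
    intro z hz
    simp only [pvPopMax] at hz
    split at hz
    · simp [List.mem_cons.mp hz]
    · rcases List.mem_cons.mp hz with rfl | hz
      · simp
      · have := ih y z hz
        rcases List.mem_cons.mp this with rfl | h
        · simp
        · simp [h]

lemma pvPopMax_sum (x : Int) (xs : List Int) :
    (pvPopMax x xs).1 + (pvPopMax x xs).2.sum = x + xs.sum := by
  induction xs generalizing x with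
  | nil => simp [pvPopMax]
  | cons y ys ih =>
    simp only [pvPopMax]
    split
    · simp
    · have := ih y
      simp only [List.sum_cons]
      omega

lemma pvPopMax_of_max (x : Int) (xs : List Int) (h : ∀ y ∈ xs, y ≤ x) :
    pvPopMax x xs = (x, xs) := by
  cases xs with
  | nil => rfl
  | cons y ys =>
    have hm : (pvPopMax y ys).1 ∈ y :: ys := pvPopMax_mem y ys
    have : (pvPopMax y ys).1 ≤ x := h _ hm
    simp [pvPopMax, this]

-- A's descent on one popped maximum: starting just after a push of l on top of `others`
-- (sum = others.sum + l), repeated single subtractions of r = others.sum compute l % r: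
-- `false` if r divides l, otherwise the state (r + l % r, (l % r) :: others).
lemma pvALoop_descent (l : Int) (others : List Int)
    (hl : 1 ≤ l) (hnn : ∀ y ∈ others, 0 ≤ y) (hr : 2 ≤ others.sum) :
    pvALoop (others.sum + l) (l :: others) =
      (if PySem.Int.mod l others.sum = 0 then false
       else pvALoop (others.sum + PySem.Int.mod l others.sum)
              ((PySem.Int.mod l others.sum) :: others)) := by
  set r := others.sum with hrdef
  have hrpos : (0:Int) < r := by omega
  have hmod : PySem.Int.mod l r = l % r := PySem.Int.mod_eq_emod_of_pos hrpos
  by_cases hlt : l < r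
  · -- l is already below r: l % r = l and both sides are literally the same state
    have : l % r = l := Int.emod_eq_of_lt (by omega) hlt
    rw [hmod, this, if_neg (by omega)]
  · rw [not_lt] at hlt
    have hle : ∀ y ∈ others, y ≤ l := by
      intro y hy
      have h1 : 0 ≤ y := hnn y hy
      have h2 : y ≤ others.sum := List.single_le_sum hnn y hy
      omega
    have hpop : pvPopMax l others = (l, others) := pvPopMax_of_max l others hle
    by_cases heq : l = r
    · -- l = r: A pops l, finds lastsum - sum = 0, returns false; and r ∣ l
      subst heq
      rw [hmod, Int.emod_self, if_pos rfl]
      unfold pvALoop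
      simp only [hpop]
      rw [if_neg (by omega), if_pos (by omega)]
    · -- l > r: one subtraction step, then induction on the smaller l - r
      have hgt : r < l := lt_of_le_of_ne hlt (Ne.symm heq)
      have step : pvALoop (r + l) (l :: others) = pvALoop (r + (l - r)) ((l - r) :: others) := by
        conv_lhs => rw [pvALoop.eq_def]
        simp only [hpop]
        rw [if_neg (by omega), if_neg (by omega)]
        rw [show r + l - l = r from by omega]
        rw [dif_pos (by omega)]
      have ih := pvALoop_descent (l - r) others (by omega) hnn (by omega)
      rw [step, ih, hmod]
      rw [PySem.Int.mod_eq_emod_of_pos hrpos, Int.sub_emod_right]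
termination_by l.toNat
decreasing_by omega

-- The main loop equivalence: on a nonempty heap of nonnegative values, A's loop and B's loop
-- agree (strong induction on the total sum; one B iteration = one A descent).
lemma pvLoop_eq (n : Nat) : ∀ heap : List Int, heap.sum.toNat = n → heap ≠ [] →
    (∀ y ∈ heap, 0 ≤ y) → pvALoop heap.sum heap = pvBLoop heap.sum heap := by
  induction n using Nat.strong_induction_on with
  | _ n ih =>
    intro heap hn hne hnn
    match heap with
    | h :: t =>
      set p := pvPopMax h t with hp
      have hmem : p.1 ∈ h :: t := pvPopMax_mem h t
      have hsub : ∀ y ∈ p.2, y ∈ h :: t := pvPopMax_sub h t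
      have hsum : p.1 + p.2.sum = (h :: t).sum := by
        simpa using pvPopMax_sum h t
      have hnn2 : ∀ y ∈ p.2, 0 ≤ y := fun y hy => hnn y (hsub y hy)
      have hm0 : 0 ≤ p.1 := hnn _ hmem
      have hr0 : 0 ≤ p.2.sum := List.sum_nonneg hnn2
      set S := (h :: t).sum with hS
      set r := S - p.1 with hrdef
      have hrsum : r = p.2.sum := by omega
      unfold pvALoop pvBLoop
      simp only [← hp, ← hrdef]
      by_cases h1 : p.1 = 1 ∨ r = 1
      · rw [if_pos h1, if_pos h1]
      · rw [if_neg h1, if_neg h1]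
        by_cases h2 : p.1 ≤ r ∨ r ≤ 0
        · rw [if_pos (by omega), if_pos h2]
        · rw [if_neg (by omega), if_neg h2]
          -- now p.1 > r ≥ 2
          have hr2 : 2 ≤ r := by omega
          have hgt : r < p.1 := by omega
          have hguardA : (r + (p.1 - r)).toNat < S.toNat := by omega
          rw [dif_pos hguardA]
          have hdesc := pvALoop_descent (p.1 - r) p.2 (by omega) hnn2 (by omega)
          rw [← hrsum] at hdesc
          have hmod_eq : PySem.Int.mod (p.1 - r) r = PySem.Int.mod p.1 r := by
            rw [PySem.Int.mod_eq_emod_of_pos (by omega), PySem.Int.mod_eq_emod_of_pos (by omega),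
              Int.sub_emod_right]
          rw [hdesc, hmod_eq]
          set m := PySem.Int.mod p.1 r with hm
          have hmlt : m < r := PySem.Int.mod_lt _ (by omega)
          have hmnn : 0 ≤ m := PySem.Int.mod_nonneg _ (by omega)
          by_cases hz : m = 0
          · rw [if_pos hz, if_pos hz]
          · rw [if_neg hz, if_neg hz]
            rw [dif_pos (by omega)]
            have := ih (m + r).toNat (by omega) (m :: p.2)
              (by rw [List.sum_cons]; omega) (by simp)
              (by
                intro y hy
                rcases List.mem_cons.mp hy with rfl | hy
                · exact hmnn
                · exact hnn2 y hy)
            rw [List.sum_cons, show p.2.sum = r from hrsum.symm] at this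
            rw [show r + m = m + r from by omega]
            exact this

lemma createtarget_sum_eq (target : List Int) :
    (PySem.List.pyRange 0 (target.length : Int) 1).foldl
      (fun s i => s + PySem.List.pyGetD target i 0) 0 = target.sum := by
  have h := PySem.List.foldl_pyRange_zero_pyGetD' target 0 (fun s x => s + x) 0
  simp only [h]
  rw [List.sum_eq_foldl]

-- ===== VERDICT (by name: the statement is the Claim_ definition above) =====
theorem createtarget_spec : Claim_equal_createtarget := by
  intro target _ hpre
  unfold Spec_createtarget createtarget createtarget_alt
  simp only [PySem.List.foldl_append_singleton, List.nil_append, createtarget_sum_eq]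
  exact pvLoop_eq target.sum.toNat target rfl hpre.1 hpre.2
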